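-- pv_equiv track=rewrite | github.com/heereal/Algorithm | 프로그래머스/2/131704. 택배상자/택배상자.py | solution
-- ===== SOURCE A (Python) =====
-- def solution(order):
--     main_first_box = 1
--     sub = []
--     answer = 0
--
--     for box in order:
--         if box not in sub and box >= main_first_box:
--             temp = [i for i in range(main_first_box, box + 1)]
--             sub += temp
--             main_first_box = box + 1
--
--         if sub.pop() == box:
--             answer += 1
--         else:
--             break
--
--     return answer
-- ===== SOURCE B (Python) =====
-- def solution(order):
--     # next-box counter + stack of (lo, hi) runs of consecutive box numbers (hi on top):
--     # O(1) per delivered box, no membership scan, no materialized sub-belt list.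
--     ranges = []
--     nxt = 1
--     answer = 0
--     for box in order:
--         if box >= nxt:
--             ranges.append((nxt, box))
--             nxt = box + 1
--         if not ranges:
--             break
--         lo, hi = ranges[-1]
--         if hi != box:
--             break
--         if lo == hi:
--             ranges.pop()
--         else:
--             ranges[-1] = (lo, hi - 1)
--         answer += 1
--     return answer
-- ===== Notes on version B (the rewrite author's own statement) =====
-- stated objective: faster
-- what changed: B replaces A's per-step linear membership scan over the sub belt and the materialized list of pending boxes by a next-box counter plus a stack of (lo,hi) runs of consecutive box numbers, making every step O(1) regardless of box values.
import Mathlib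
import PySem

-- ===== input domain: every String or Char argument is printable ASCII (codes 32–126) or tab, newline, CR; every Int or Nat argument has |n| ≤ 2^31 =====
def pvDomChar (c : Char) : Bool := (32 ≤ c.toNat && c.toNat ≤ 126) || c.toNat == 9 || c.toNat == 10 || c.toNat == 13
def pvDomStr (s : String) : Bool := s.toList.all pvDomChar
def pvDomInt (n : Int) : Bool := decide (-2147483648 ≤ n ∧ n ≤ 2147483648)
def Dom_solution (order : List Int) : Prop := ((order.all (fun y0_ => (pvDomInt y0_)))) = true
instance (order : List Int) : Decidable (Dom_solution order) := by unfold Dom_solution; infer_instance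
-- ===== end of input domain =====

-- B replaces A's linear membership scan and materialized sub-belt list by a next-box
-- counter plus a stack of (lo,hi) runs of consecutive box numbers (faster: O(1) per step).


-- ===== PORT A =====
-- loop state: main_first_box, sub (belt list, top at the end), answer;
-- the `none` branch of pop? is where Python A raises IndexError (outside Pre_).
def solutionLoopA : List Int → Int → List Int → Int → Int
  | [], _, _, answer => answer
  | box :: rest, mfb, sub, answer =>
    let st :=
      if box ∉ sub ∧ mfb ≤ box then
        (box + 1, sub ++ PySem.List.pyRange mfb (box + 1))
      else (mfb, sub)
    match PySem.List.pop? st.2 with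
    | none => answer
    | some (top, sub') =>
      if top = box then solutionLoopA rest st.1 sub' (answer + 1) else answer

def solution (order : List Int) : Int := solutionLoopA order 1 [] 0

-- ===== PORT B =====
-- loop state: ranges (stack of (lo,hi) runs, hi on top), nxt, answer
def solutionLoopB : List Int → List (Int × Int) → Int → Int → Int
  | [], _, _, answer => answer
  | box :: rest, ranges, nxt, answer =>
    let st := if nxt ≤ box then (ranges ++ [(nxt, box)], box + 1) else (ranges, nxt)
    match st.1.getLast? with
    | none => answer
    | some (lo, hi) =>
      if hi ≠ box then answer
      else
        solutionLoopB rest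
          (if lo = hi then st.1.dropLast else st.1.dropLast ++ [(lo, hi - 1)])
          st.2 (answer + 1)

def solution_alt (order : List Int) : Int := solutionLoopB order [] 1 0

-- ===== PRECONDITION & SPEC =====
-- Pre_ excludes exactly the inputs on which Python A raises IndexError (popping an empty
-- sub belt): that happens precisely when some prefix of length i is a stack-realizable
-- permutation of 1..i (it contains 1..i and avoids the pattern 312, so every pop matches
-- and empties the belt) while the next box is at most i (so nothing is pushed before the pop).
def Pre_solution (order : List Int) : Prop :=
  ∀ i ∈ List.range order.length,
    ¬ ((∀ k ∈ List.range i, ((k : Int) + 1) ∈ order.take i) ∧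
       (∀ j ∈ List.range i, ∀ k ∈ List.range i, ∀ m ∈ List.range i,
         j < k → k < m →
         ¬ ((order.take i).getD k 0 < (order.take i).getD m 0 ∧
            (order.take i).getD m 0 < (order.take i).getD j 0)) ∧
       order.getD i 0 ≤ (i : Int))
instance (order : List Int) : Decidable (Pre_solution order) := by unfold Pre_solution; infer_instance
def pvWitness_solution : List Int := [1, 2, 3]
def Spec_solution (order : List Int) (out : Int) : Prop := out = solution_alt order
instance (order : List Int) (out : Int) : Decidable (Spec_solution order out) := by unfold Spec_solution; infer_instance

-- ===== CLAIM (what is proved, stated in full; the proofs are below) =====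
def Claim_equal_solution : Prop := ∀ (order : List Int), Dom_solution order → Pre_solution order → Spec_solution order (solution order)

-- ===== LEMMAS AND PROOFS =====

-- flatten a stack of runs to A's explicit belt list
def flatRuns (rs : List (Int × Int)) : List Int :=
  rs.flatMap (fun p => PySem.List.pyRange p.1 (p.2 + 1))

-- the loop invariant: every run is nonempty and lies strictly below the next-box counter
def InvRuns (rs : List (Int × Int)) (mfb : Int) : Prop :=
  ∀ p ∈ rs, p.1 ≤ p.2 ∧ p.2 < mfb

theorem flatRuns_append (rs ts : List (Int × Int)) :
    flatRuns (rs ++ ts) = flatRuns rs ++ flatRuns ts := by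
  simp [flatRuns]

theorem mem_flatRuns_lt {rs : List (Int × Int)} {mfb x : Int}
    (hinv : InvRuns rs mfb) (hx : x ∈ flatRuns rs) : x < mfb := by
  rcases List.mem_flatMap.mp hx with ⟨p, hp, hxp⟩
  have := (PySem.List.mem_pyRange_one.mp hxp).2
  have := (hinv p hp).2
  omega

theorem loops_agree (rest : List Int) :
    ∀ (rs : List (Int × Int)) (mfb answer : Int), InvRuns rs mfb →
      solutionLoopA rest mfb (flatRuns rs) answer = solutionLoopB rest rs mfb answer := by
  induction rest with
  | nil => intro rs mfb answer _; rfl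
  | cons box rest ih =>
    intro rs mfb answer hinv
    by_cases hpush : mfb ≤ box
    · -- push branch: box is beyond everything on the belt, both sides extend the belt
      have hnotmem : box ∉ flatRuns rs := fun hm => absurd (mem_flatRuns_lt hinv hm) (by omega)
      have hsplit : PySem.List.pyRange mfb (box + 1) = PySem.List.pyRange mfb box ++ [box] :=
        PySem.List.pyRange_one_succ_right hpush
      simp only [solutionLoopA, solutionLoopB, if_pos (And.intro hnotmem hpush), if_pos hpush]
      rw [hsplit, show flatRuns rs ++ (PySem.List.pyRange mfb box ++ [box]) =
            (flatRuns rs ++ PySem.List.pyRange mfb box) ++ [box] from by simp,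
          PySem.List.pop?_last]
      simp only [List.getLast?_concat, List.dropLast_concat]
      rw [if_pos trivial, if_neg (show ¬(box ≠ box) by simp)]
      by_cases heq : mfb = box
      · rw [if_pos heq]
        subst heq
        rw [show PySem.List.pyRange mfb mfb = [] from PySem.List.pyRange_one_eq_nil le_rfl,
            List.append_nil]
        exact ih rs (mfb + 1) (answer + 1)
          (fun p hp => ⟨(hinv p hp).1, by have := (hinv p hp).2; omega⟩)
      · rw [if_neg heq,
            show flatRuns rs ++ PySem.List.pyRange mfb box = flatRuns (rs ++ [(mfb, box - 1)]) from by
              rw [flatRuns_append]; simp [flatRuns, show box - 1 + 1 = box from by ring]]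
        refine ih (rs ++ [(mfb, box - 1)]) (box + 1) (answer + 1) ?_
        intro p hp
        rcases List.mem_append.mp hp with hp | hp
        · exact ⟨(hinv p hp).1, by have := (hinv p hp).2; omega⟩
        · simp only [List.mem_singleton] at hp
          subst hp
          exact ⟨by simp; omega, by simp⟩
    · -- no-push branch: A's guard fails (it demands mfb ≤ box), both sides pop the belt
      have hguard : ¬ (box ∉ flatRuns rs ∧ mfb ≤ box) := fun h => hpush h.2
      simp only [solutionLoopA, solutionLoopB, if_neg hguard, if_neg hpush]
      rcases List.eq_nil_or_concat rs with hnil | ⟨rs₀, ⟨lo, hi⟩, hconcat⟩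
      · subst hnil; rfl
      · rw [List.concat_eq_append] at hconcat
        subst hconcat
        have hin : (lo, hi) ∈ rs₀ ++ [(lo, hi)] := by simp
        have hlohi := (hinv _ hin).1
        have hsplit : PySem.List.pyRange lo (hi + 1) = PySem.List.pyRange lo hi ++ [hi] :=
          PySem.List.pyRange_one_succ_right hlohi
        rw [show flatRuns (rs₀ ++ [(lo, hi)]) =
              (flatRuns rs₀ ++ PySem.List.pyRange lo hi) ++ [hi] from by
            rw [flatRuns_append]; simp [flatRuns, hsplit],
          PySem.List.pop?_last]
        simp only [List.getLast?_concat, List.dropLast_concat]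
        by_cases htop : hi = box
        · subst htop
          rw [if_pos rfl, if_neg (show ¬(hi ≠ hi) by simp)]
          by_cases hlo : lo = hi
          · rw [if_pos hlo]
            subst hlo
            rw [show PySem.List.pyRange lo lo = [] from PySem.List.pyRange_one_eq_nil le_rfl,
                List.append_nil]
            exact ih rs₀ mfb (answer + 1) (fun p hp => hinv p (by simp [hp]))
          · rw [if_neg hlo,
              show flatRuns rs₀ ++ PySem.List.pyRange lo hi = flatRuns (rs₀ ++ [(lo, hi - 1)]) from by
                rw [flatRuns_append]; simp [flatRuns, show hi - 1 + 1 = hi from by ring]]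
            refine ih (rs₀ ++ [(lo, hi - 1)]) mfb (answer + 1) ?_
            intro p hp
            rcases List.mem_append.mp hp with hp | hp
            · exact hinv p (by simp [hp])
            · simp only [List.mem_singleton] at hp
              subst hp
              have h2 := (hinv _ hin).2
              exact ⟨by simp; omega, by simp; omega⟩
        · rw [if_neg htop, if_pos (show hi ≠ box from htop)]

-- ===== VERDICT (by name: the statements are the Claim_ definitions above) =====
theorem solution_spec : Claim_equal_solution := by
  intro order _ _
  unfold Spec_solution solution solution_alt
  have h := loops_agree order [] 1 0 (by intro p hp; simp at hp)
  simpa [flatRuns] using h
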